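-- pv_equiv track=rewrite | github.com/sky-sky-code/ToTopSkills | leetcode/heap.py | hasystack_needle
-- ===== SOURCE A (Python) =====
-- def hasystack_needle(haystack, needle):
--     two_pointer = len(needle)
--
--     for i in range(len(haystack)):
--         if haystack[i:two_pointer] != needle:
--             two_pointer += 1
--         else:
--             return i
--     return -1
-- ===== SOURCE B (Python) =====
-- def hasystack_needle(haystack, needle):
--     return haystack.find(needle)
-- ===== Notes on version B (the rewrite author's own statement) =====
-- stated objective: idiomatic
-- what changed: Replaces the manual index loop with repeated slice comparison by a single call to str.find (ported as PySem.Str.find), the standard-library substring search.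
-- intended difference: On the single input haystack='' and needle='', A's loop body never runs so A returns -1, while B returns 0 (the empty needle occurs at index 0, as str.find and the strStr specification say); B's value is the intended one. — e.g. on hasystack_needle("", ""): A returns -1, B returns 0
import Mathlib
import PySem

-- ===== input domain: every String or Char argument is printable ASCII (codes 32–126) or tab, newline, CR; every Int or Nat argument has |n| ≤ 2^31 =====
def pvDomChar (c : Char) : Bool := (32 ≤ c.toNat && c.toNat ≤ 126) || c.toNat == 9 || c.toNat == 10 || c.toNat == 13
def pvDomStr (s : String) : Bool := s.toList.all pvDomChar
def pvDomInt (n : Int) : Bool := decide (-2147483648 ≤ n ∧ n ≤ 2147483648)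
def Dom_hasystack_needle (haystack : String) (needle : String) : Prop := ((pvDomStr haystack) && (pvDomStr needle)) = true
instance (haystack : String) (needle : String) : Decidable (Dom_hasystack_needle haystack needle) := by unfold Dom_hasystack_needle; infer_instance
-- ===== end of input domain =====

-- B replaces A's manual loop of slice comparisons by the standard-library substring
-- search str.find (idiomatic); return value only, no argument is mutated.

-- ===== PORT A =====
-- the for-loop with its early return, carrying the two_pointer state
def pvLoopA (haystack : String) (needle : String) : List Int → Int → Int
  | [], _ => -1
  | i :: rest, two_pointer =>
    if PySem.Str.slice haystack (some i) (some two_pointer) ≠ needle then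
      pvLoopA haystack needle rest (two_pointer + 1)
    else i

def hasystack_needle (haystack : String) (needle : String) : Int :=
  pvLoopA haystack needle (PySem.List.pyRange 0 (PySem.Str.len haystack)) (PySem.Str.len needle)

-- ===== PORT B =====
def hasystack_needle_alt (haystack : String) (needle : String) : Int :=
  PySem.Str.find haystack needle

-- ===== PRECONDITION & SPEC =====
-- On the single input haystack = "" and needle = "", A's loop body never runs so A
-- returns -1, while B returns 0 (the empty needle occurs at index 0, as str.find and
-- the strStr specification say); B's value is the intended one.
def D_hasystack_needle (haystack : String) (needle : String) : Prop :=
  haystack = "" ∧ needle = ""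
instance (haystack : String) (needle : String) : Decidable (D_hasystack_needle haystack needle) := by
  unfold D_hasystack_needle; infer_instance

def Spec_hasystack_needle (haystack : String) (needle : String) (out : Int) : Prop :=
  ¬ D_hasystack_needle haystack needle → out = hasystack_needle_alt haystack needle
instance (haystack : String) (needle : String) (out : Int) : Decidable (Spec_hasystack_needle haystack needle out) := by
  unfold Spec_hasystack_needle; infer_instance

def pvDiffWitness_hasystack_needle : String × String := ("", "")
def pvDiffWitnessOut_hasystack_needle : Int × Int := (-1, 0)

-- ===== CLAIM (what is proved, stated in full; the proofs are below) =====
def Claim_unchanged_hasystack_needle : Prop := ∀ (haystack : String) (needle : String), Dom_hasystack_needle haystack needle → Spec_hasystack_needle haystack needle (hasystack_needle haystack needle)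
def Claim_changed_hasystack_needle : Prop := Dom_hasystack_needle (pvDiffWitness_hasystack_needle.1) (pvDiffWitness_hasystack_needle.2) ∧ D_hasystack_needle (pvDiffWitness_hasystack_needle.1) (pvDiffWitness_hasystack_needle.2) ∧ hasystack_needle (pvDiffWitness_hasystack_needle.1) (pvDiffWitness_hasystack_needle.2) = pvDiffWitnessOut_hasystack_needle.1 ∧ hasystack_needle_alt (pvDiffWitness_hasystack_needle.1) (pvDiffWitness_hasystack_needle.2) = pvDiffWitnessOut_hasystack_needle.2 ∧ pvDiffWitnessOut_hasystack_needle.1 ≠ pvDiffWitnessOut_hasystack_needle.2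
def Claim_exact_hasystack_needle : Prop := ∀ (haystack : String) (needle : String), Dom_hasystack_needle haystack needle → D_hasystack_needle haystack needle → hasystack_needle haystack needle ≠ hasystack_needle_alt haystack needle

-- ===== LEMMAS AND PROOFS =====

-- A's loop condition at index i (where two_pointer = needle.length + i) tests exactly
-- "needle is a prefix of haystack dropped at i".
lemma pvLoopA_cond (haystack needle : String) (i : Nat) :
    PySem.Str.slice haystack (some (i : Int)) (some ((needle.toList.length + i : Nat) : Int)) = needle
      ↔ needle.toList <+: haystack.toList.drop i := by
  constructor
  · intro h
    have h' := congrArg String.toList h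
    rw [PySem.Str.toList_slice] at h'
    simp only [PySem.Chars.slice_eq_listSlice] at h'
    rw [PySem.List.slice_natCast] at h'
    have : (needle.toList.length + i) - i = needle.toList.length := by omega
    rw [this] at h'
    rw [← h']
    exact List.take_prefix _ _
  · intro h
    apply String.toList_inj.mp
    rw [PySem.Str.toList_slice]
    simp only [PySem.Chars.slice_eq_listSlice]
    rw [PySem.List.slice_natCast]
    have : (needle.toList.length + i) - i = needle.toList.length := by omega
    rw [this]
    exact (List.prefix_iff_eq_take.mp h).symm

-- main invariant: starting the scan at i (no match strictly before i), A's loop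
-- computes str.find
lemma pvLoopA_eq_find (haystack needle : String) (i : Nat)
    (hi : i ≤ haystack.toList.length)
    (hD : ¬ (haystack.toList = [] ∧ needle.toList = []))
    (hinv : ∀ j, j < i → ¬ needle.toList <+: haystack.toList.drop j) :
    pvLoopA haystack needle
        (PySem.List.pyRange (i : Int) (haystack.toList.length : Int))
        ((needle.toList.length + i : Nat) : Int)
      = PySem.Chars.find haystack.toList needle.toList := by
  set s := haystack.toList with hs
  set p := needle.toList with hp
  induction hn : s.length - i generalizing i with
  | zero =>
    have hi' : i = s.length := by omega
    rw [PySem.List.pyRange_one_eq_nil (by exact_mod_cast Nat.le_of_eq hi'.symm)]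
    show (-1 : Int) = _
    by_cases hpnil : p = []
    · -- then s = [] is forced, contradicting hD
      exfalso
      rcases Nat.eq_zero_or_pos s.length with h0 | h0
      · exact hD ⟨List.eq_nil_of_length_eq_zero h0, hpnil⟩
      · exact hinv 0 (by omega) (by simp [hpnil])
    · symm
      rw [PySem.Chars.find_eq_neg_one_iff]
      intro hinf
      obtain ⟨j, hj⟩ := (PySem.Chars.exists_prefix_drop_iff_isIn p s).mpr
        ((PySem.Chars.isIn_iff_infix p s).mpr hinf)
      by_cases hjn : j < s.length
      · exact hinv j (by omega) hj
      · have : s.drop j = [] := List.drop_eq_nil_of_le (by omega)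
        rw [this, List.prefix_nil] at hj
        exact hpnil hj
  | succ k ih =>
    have hlt : i < s.length := by omega
    rw [PySem.List.pyRange_one_cons (by exact_mod_cast hlt)]
    show pvLoopA haystack needle _ _ = _
    rw [pvLoopA]
    by_cases hmatch : p <+: s.drop i
    · rw [if_neg (by simpa using (pvLoopA_cond haystack needle i).mpr hmatch)]
      -- find equals i here
      have hinf : p <:+: s :=
        (PySem.Chars.isIn_iff_infix p s).mp
          ((PySem.Chars.exists_prefix_drop_iff_isIn p s).mp ⟨i, hmatch⟩)
      have hne : PySem.Chars.find s p ≠ -1 := (PySem.Chars.find_ne_neg_one_iff s p).mpr hinf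
      have hspec := PySem.Chars.findFrom_natCast_spec s p 0 (Nat.zero_le _)
        (by simpa [PySem.Chars.findFrom_zero] using hne)
      simp only [Nat.cast_zero, PySem.Chars.findFrom_zero] at hspec
      obtain ⟨hge, hpref, hmin⟩ := hspec
      set f := (PySem.Chars.find s p).toNat with hf
      have hfind_nonneg : 0 ≤ PySem.Chars.find s p := by
        rcases (PySem.Chars.find_nonneg_iff s p).mpr hinf with h; exact h
      have hfe : PySem.Chars.find s p = (f : Int) := (Int.toNat_of_nonneg hfind_nonneg).symm
      have h1 : ¬ f < i := fun h => hinv f h hpref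
      have h2 : ¬ i < f := fun h => hmin i (Nat.zero_le _) h hmatch
      have : f = i := by omega
      rw [hfe, this]
    · rw [if_pos (by simpa using fun h => hmatch ((pvLoopA_cond haystack needle i).mp h))]
      have harg : ((p.length + i : Nat) : Int) + 1 = ((p.length + (i + 1) : Nat) : Int) := by
        push_cast; ring
      have hcast : ((i : Int) + 1) = ((i + 1 : Nat) : Int) := by push_cast; ring
      rw [harg, hcast]
      apply ih (i + 1) (by omega) _ (by omega)
      intro j hj
      rcases Nat.lt_succ_iff_lt_or_eq.mp hj with h | h
      · exact hinv j h
      · subst h; exact hmatch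

-- ===== VERDICT (by name: the statement is the Claim_ definition above) =====
theorem hasystack_needle_spec : Claim_unchanged_hasystack_needle := by
  intro haystack needle _ hD
  have hD' : ¬ (haystack.toList = [] ∧ needle.toList = []) := by
    intro ⟨h1, h2⟩
    exact hD ⟨String.toList_eq_nil_iff.mp h1, String.toList_eq_nil_iff.mp h2⟩
  have h := pvLoopA_eq_find haystack needle 0 (Nat.zero_le _) hD'
    (by intro j hj; omega)
  show hasystack_needle haystack needle = hasystack_needle_alt haystack needle
  rw [hasystack_needle, hasystack_needle_alt, PySem.Str.find_eq, PySem.Str.len_eq,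
    PySem.Str.len_eq]
  simpa using h

theorem hasystack_needle_changed : Claim_changed_hasystack_needle := by
  unfold Claim_changed_hasystack_needle; decide

theorem hasystack_needle_tight : Claim_exact_hasystack_needle := by
  intro haystack needle _ hD
  obtain ⟨h1, h2⟩ := hD
  subst h1; subst h2
  decide
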